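-- pv_equiv track=rewrite | github.com/jmaelectro/latex-word-equation-converter | main.py | parse_math_segments
-- ===== SOURCE A (Python) =====
-- from typing import Any, Dict, List, Optional, Tuple
--
-- Segment = Tuple[str, str]  # ("text" | "inline" | "display", contenido)
--
-- def parse_math_segments(text: str) -> List[Segment]:
--     segments: List[Segment] = []
--     buf: List[str] = []
--
--     def flush_text() -> None:
--         if buf:
--             segments.append(("text", "".join(buf)))
--             buf.clear()
--
--     i = 0
--     n = len(text)
--     while i < n:
--         if text.startswith("$$", i):
--             flush_text()
--             end = text.find("$$", i + 2)
--             if end == -1: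
--                 buf.append(text[i:])
--                 break
--             latex = text[i + 2 : end]
--             segments.append(("display", latex.strip()))
--             i = end + 2
--             continue
--
--         if text.startswith(r"\[", i):
--             flush_text()
--             end = text.find(r"\]", i + 2)
--             if end == -1:
--                 buf.append(text[i:])
--                 break
--             latex = text[i + 2 : end]
--             segments.append(("display", latex.strip()))
--             i = end + 2
--             continue
--
--         if text[i] == "$":
--             flush_text()
--             end = text.find("$", i + 1)
--             if end == -1:
--                 buf.append(text[i:])
--                 break
--             latex = text[i + 1 : end]
--             segments.append(("inline", latex.strip()))
--             i = end + 1
--             continue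
--
--         buf.append(text[i])
--         i += 1
--
--     flush_text()
--     return segments
-- ===== SOURCE B (Python) =====
-- from typing import List, Tuple
--
-- Segment = Tuple[str, str]  # ("text" | "inline" | "display", contenido)
--
-- def parse_math_segments(text: str) -> List[Segment]:
--     # Cursor-based: jump straight to the nearest delimiter with str.find instead of
--     # scanning character by character into a buffer.
--     segments: List[Segment] = []
--     i = 0
--     n = len(text)
--     while i < n:
--         p2 = text.find("$$", i)
--         pb = text.find(r"\[", i)
--         p1 = text.find("$", i)
--         candidates = [p for p in (p2, pb, p1) if p != -1]
--         if not candidates: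
--             segments.append(("text", text[i:]))
--             break
--         pos = min(candidates)
--         if pos > i:
--             segments.append(("text", text[i:pos]))
--         if p2 == pos:
--             end = text.find("$$", pos + 2)
--             if end == -1:
--                 segments.append(("text", text[pos:]))
--                 break
--             segments.append(("display", text[pos + 2 : end].strip()))
--             i = end + 2
--         elif pb == pos:
--             end = text.find(r"\]", pos + 2)
--             if end == -1:
--                 segments.append(("text", text[pos:]))
--                 break
--             segments.append(("display", text[pos + 2 : end].strip()))
--             i = end + 2
--         else:
--             end = text.find("$", pos + 1)
--             if end == -1:
--                 segments.append(("text", text[pos:]))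
--                 break
--             segments.append(("inline", text[pos + 1 : end].strip()))
--             i = end + 1
--     return segments
-- ===== Notes on version B (the rewrite author's own statement) =====
-- stated objective: faster
-- what changed: B replaces A's character-by-character scan that accumulates a buffer by a cursor that jumps directly to the nearest upcoming delimiter (min of str.find for '$$', '\[' and '$', '$$' beating '$' on a tie) and emits each text run as one slice.
import Mathlib
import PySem

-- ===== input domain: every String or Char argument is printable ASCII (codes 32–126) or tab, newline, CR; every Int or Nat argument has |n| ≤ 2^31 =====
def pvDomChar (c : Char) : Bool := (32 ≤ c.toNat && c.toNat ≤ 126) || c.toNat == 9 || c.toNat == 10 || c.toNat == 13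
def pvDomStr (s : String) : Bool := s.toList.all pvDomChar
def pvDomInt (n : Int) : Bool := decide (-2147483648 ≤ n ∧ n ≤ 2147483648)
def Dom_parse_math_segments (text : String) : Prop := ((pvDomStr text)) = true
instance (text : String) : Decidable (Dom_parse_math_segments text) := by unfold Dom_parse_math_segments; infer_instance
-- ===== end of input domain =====

-- B replaces A's char-by-char buffered scan by a cursor that jumps to the nearest delimiter
-- with str.find and emits text runs as single slices (objective: faster, as measured by the
-- timing run; return values proved equal).


-- ===== PORT A =====
-- flush_text(): emit the buffered characters as one "text" segment if nonempty
def pvFlush (buf : List Char) (segs : List (String × String)) : List (String × String) :=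
  if buf = [] then segs else segs ++ [("text", String.ofList buf)]

-- bounds of a successful str.find(sub, k): result ≥ k and the occurrence fits in the string
-- (used by both ports' termination proofs)
theorem pvFF_bounds (cs sub : List Char) (k : Nat) (hk : k ≤ cs.length)
    (hs : sub ≠ []) (h : PySem.Chars.findFrom cs sub (k : Int) ≠ -1) :
    (k : Int) ≤ PySem.Chars.findFrom cs sub (k : Int) ∧
      (PySem.Chars.findFrom cs sub (k : Int)).toNat + sub.length ≤ cs.length := by
  obtain ⟨h1, h2, -⟩ := PySem.Chars.findFrom_natCast_spec cs sub k hk h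
  refine ⟨h1, ?_⟩
  have := h2.length_le
  simp only [List.length_drop] at this
  have hsl : 1 ≤ sub.length := by cases sub <;> simp_all
  omega

-- min(candidates) is one of p2, pb, p1 and is not -1 (used by port B's termination proof)
theorem pvMin_cases {p2 pb p1 pos : Int}
    (hm : PySem.List.min? ([p2, pb, p1].filter (fun p => p ≠ -1)) id = some pos) :
    pos ≠ -1 ∧ (pos = p2 ∨ pos = pb ∨ pos = p1) := by
  have hmem := PySem.List.min?_mem hm
  simp only [List.mem_filter, List.mem_cons, List.not_mem_nil, or_false,
    decide_eq_true_eq] at hmem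
  exact ⟨hmem.2, hmem.1⟩

-- the while-loop of A: state (i, buf, segments); char-by-char with buffered text
def pvLoopA (cs : List Char) (i : Nat) (buf : List Char) (segs : List (String × String)) :
    List (String × String) :=
  if hn : i < cs.length then
    if hs2 : PySem.Chars.startswith (cs.drop i) ['$', '$'] then
      let segs' := pvFlush buf segs
      let e := PySem.Chars.findFrom cs ['$', '$'] ((i + 2 : Nat) : Int)
      if he : e = -1 then
        pvFlush (PySem.List.slice cs (some (i : Int)) none) segs'
      else
        pvLoopA cs (e.toNat + 2) []
          (segs' ++ [("display", String.ofList (PySem.Chars.strip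
            (PySem.List.slice cs (some ((i + 2 : Nat) : Int)) (some e))))])
    else if hsb : PySem.Chars.startswith (cs.drop i) ['\\', '['] then
      let segs' := pvFlush buf segs
      let e := PySem.Chars.findFrom cs ['\\', ']'] ((i + 2 : Nat) : Int)
      if he : e = -1 then
        pvFlush (PySem.List.slice cs (some (i : Int)) none) segs'
      else
        pvLoopA cs (e.toNat + 2) []
          (segs' ++ [("display", String.ofList (PySem.Chars.strip
            (PySem.List.slice cs (some ((i + 2 : Nat) : Int)) (some e))))])
    else if cs[i]'hn = '$' then
      let segs' := pvFlush buf segs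
      let e := PySem.Chars.findFrom cs ['$'] ((i + 1 : Nat) : Int)
      if he : e = -1 then
        pvFlush (PySem.List.slice cs (some (i : Int)) none) segs'
      else
        pvLoopA cs (e.toNat + 1) []
          (segs' ++ [("inline", String.ofList (PySem.Chars.strip
            (PySem.List.slice cs (some ((i + 1 : Nat) : Int)) (some e))))])
    else
      pvLoopA cs (i + 1) (buf ++ [cs[i]'hn]) segs
  else pvFlush buf segs
  termination_by cs.length - i
  decreasing_by
  · have hp : ['$', '$'] <+: cs.drop i := (PySem.Chars.startswith_iff _ _).mp hs2
    have hl : i + 2 ≤ cs.length := by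
      have := hp.length_le; simp only [List.length_drop] at this; simp at this; omega
    have := (pvFF_bounds cs ['$', '$'] (i + 2) hl (by simp) he).1
    omega
  · have hp : ['\\', '['] <+: cs.drop i := (PySem.Chars.startswith_iff _ _).mp hsb
    have hl : i + 2 ≤ cs.length := by
      have := hp.length_le; simp only [List.length_drop] at this; simp at this; omega
    have := (pvFF_bounds cs ['\\', ']'] (i + 2) hl (by simp) he).1
    omega
  · have := (pvFF_bounds cs ['$'] (i + 1) (by omega) (by simp) he).1
    omega
  · omega

def parse_math_segments (text : String) : List (String × String) :=
  pvLoopA text.toList 0 [] []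

-- ===== PORT B =====
-- the while-loop of B: cursor i, jump to min(find('$$',i), find('\[',i), find('$',i))
def pvLoopB (cs : List Char) (i : Nat) (segs : List (String × String)) :
    List (String × String) :=
  if hn : i < cs.length then
    let p2 := PySem.Chars.findFrom cs ['$', '$'] (i : Int)
    let pb := PySem.Chars.findFrom cs ['\\', '['] (i : Int)
    let p1 := PySem.Chars.findFrom cs ['$'] (i : Int)
    match hm : PySem.List.min? ([p2, pb, p1].filter (fun p => p ≠ -1)) id with
    | none => segs ++ [("text", String.ofList (PySem.List.slice cs (some (i : Int)) none))]
    | some pos =>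
      let segs' := segs ++ (if (i : Int) < pos then
        [("text", String.ofList (PySem.List.slice cs (some (i : Int)) (some pos)))] else [])
      if h2 : p2 = pos then
        let e := PySem.Chars.findFrom cs ['$', '$'] (pos + 2)
        if he : e = -1 then
          segs' ++ [("text", String.ofList (PySem.List.slice cs (some pos) none))]
        else
          pvLoopB cs (e.toNat + 2) (segs' ++ [("display", String.ofList (PySem.Chars.strip
            (PySem.List.slice cs (some (pos + 2)) (some e))))])
      else if hb : pb = pos then
        let e := PySem.Chars.findFrom cs ['\\', ']'] (pos + 2)
        if he : e = -1 then
          segs' ++ [("text", String.ofList (PySem.List.slice cs (some pos) none))]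
        else
          pvLoopB cs (e.toNat + 2) (segs' ++ [("display", String.ofList (PySem.Chars.strip
            (PySem.List.slice cs (some (pos + 2)) (some e))))])
      else
        let e := PySem.Chars.findFrom cs ['$'] (pos + 1)
        if he : e = -1 then
          segs' ++ [("text", String.ofList (PySem.List.slice cs (some pos) none))]
        else
          pvLoopB cs (e.toNat + 1) (segs' ++ [("inline", String.ofList (PySem.Chars.strip
            (PySem.List.slice cs (some (pos + 1)) (some e))))])
  else segs
  termination_by cs.length - i
  decreasing_by
  · obtain ⟨hne, hcase⟩ := pvMin_cases hm
    have hk : i ≤ cs.length := by omega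
    have h2' : PySem.Chars.findFrom cs ['$', '$'] (i : Int) = pos := h2
    have hb2 := pvFF_bounds cs ['$', '$'] i hk (by simp) (by rw [h2']; exact hne)
    rw [h2'] at hb2
    have hposnn : (0 : Int) ≤ pos := le_trans (by omega) hb2.1
    have hcast : pos + 2 = ((pos.toNat + 2 : Nat) : Int) := by omega
    have he' : PySem.Chars.findFrom cs ['$', '$'] ((pos.toNat + 2 : Nat) : Int) ≠ -1 := by
      rw [← hcast]; exact he
    have hlen : pos.toNat + 2 ≤ cs.length := by simp at hb2; omega
    have := (pvFF_bounds cs ['$', '$'] (pos.toNat + 2) hlen (by simp) he').1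
    rw [hcast]
    omega
  · obtain ⟨hne, hcase⟩ := pvMin_cases hm
    have hk : i ≤ cs.length := by omega
    have hb' : PySem.Chars.findFrom cs ['\\', '['] (i : Int) = pos := hb
    have hbb := pvFF_bounds cs ['\\', '['] i hk (by simp) (by rw [hb']; exact hne)
    rw [hb'] at hbb
    have hposnn : (0 : Int) ≤ pos := le_trans (by omega) hbb.1
    have hcast : pos + 2 = ((pos.toNat + 2 : Nat) : Int) := by omega
    have he' : PySem.Chars.findFrom cs ['\\', ']'] ((pos.toNat + 2 : Nat) : Int) ≠ -1 := by
      rw [← hcast]; exact he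
    have hlen : pos.toNat + 2 ≤ cs.length := by simp at hbb; omega
    have := (pvFF_bounds cs ['\\', ']'] (pos.toNat + 2) hlen (by simp) he').1
    rw [hcast]
    omega
  · obtain ⟨hne, hcase⟩ := pvMin_cases hm
    have hpos : pos = PySem.Chars.findFrom cs ['$'] (i : Int) := by
      rcases hcase with h | h | h
      · exact absurd h.symm h2
      · exact absurd h.symm hb
      · exact h
    have hk : i ≤ cs.length := by omega
    have hb1 := pvFF_bounds cs ['$'] i hk (by simp) (by rw [← hpos]; exact hne)
    rw [← hpos] at hb1
    have hposnn : (0 : Int) ≤ pos := le_trans (by omega) hb1.1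
    have hcast : pos + 1 = ((pos.toNat + 1 : Nat) : Int) := by omega
    have he' : PySem.Chars.findFrom cs ['$'] ((pos.toNat + 1 : Nat) : Int) ≠ -1 := by
      rw [← hcast]; exact he
    have hlen : pos.toNat + 1 ≤ cs.length := by simp at hb1; omega
    have := (pvFF_bounds cs ['$'] (pos.toNat + 1) hlen (by simp) he').1
    rw [hcast]
    omega

def parse_math_segments_alt (text : String) : List (String × String) :=
  pvLoopB text.toList 0 []

-- ===== PRECONDITION & SPEC =====
def Spec_parse_math_segments (text : String) (out : List (String × String)) : Prop := out = parse_math_segments_alt text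
instance (text : String) (out : List (String × String)) : Decidable (Spec_parse_math_segments text out) := by unfold Spec_parse_math_segments; infer_instance

-- ===== CLAIM (what is proved, stated in full; the proofs are below) =====
def Claim_equal_parse_math_segments : Prop := ∀ (text : String), Dom_parse_math_segments text → Spec_parse_math_segments text (parse_math_segments text)

-- ===== LEMMAS AND PROOFS =====

-- a delimiter starts at position j: a '$' or the two chars '\['
def pvDelimAt (cs : List Char) (j : Nat) : Prop :=
  ['$'] <+: cs.drop j ∨ ['\\', '['] <+: cs.drop j

theorem pvPrefix_drop_infix {cs sub : List Char} {k j : Nat} (hkj : k ≤ j)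
    (h : sub <+: cs.drop j) : sub <:+: cs.drop k := by
  have : cs.drop j = List.drop (j - k) (cs.drop k) := by
    rw [List.drop_drop]; congr 1; omega
  rw [this] at h
  exact h.isInfix.trans (List.drop_suffix _ _).isInfix

-- a '$' or '\[' prefix at j contradicts ¬ pvDelimAt; packaged branch refutations
theorem pvNoOcc {cs sub : List Char} {i : Nat} (hk : i ≤ cs.length)
    (h : PySem.Chars.findFrom cs sub (i : Int) = -1) :
    ∀ j, i ≤ j → ¬ sub <+: cs.drop j :=
  fun j hij hp =>
    ((PySem.Chars.findFrom_natCast_eq_neg_one_iff cs sub i hk).mp h)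
      (pvPrefix_drop_infix hij hp)

-- the first occurrence from i is at or before any occurrence at j ≥ i
theorem pvOcc_le {cs sub : List Char} {i j : Nat} (hk : i ≤ cs.length) (hij : i ≤ j)
    (hp : sub <+: cs.drop j) :
    PySem.Chars.findFrom cs sub (i : Int) ≠ -1 ∧
      (PySem.Chars.findFrom cs sub (i : Int)).toNat ≤ j := by
  have hne : PySem.Chars.findFrom cs sub (i : Int) ≠ -1 := by
    intro h; exact pvNoOcc hk h j hij hp
  obtain ⟨-, -, hmin⟩ := PySem.Chars.findFrom_natCast_spec cs sub i hk hne
  refine ⟨hne, ?_⟩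
  by_contra hlt
  exact hmin j hij (by omega) hp

-- the three branch tests of A are all false at a non-delimiter position
theorem pvNotDelim_branches {cs : List Char} {i : Nat} (hn : i < cs.length)
    (hd : ¬ pvDelimAt cs i) :
    ¬ PySem.Chars.startswith (cs.drop i) ['$', '$'] = true ∧
      ¬ PySem.Chars.startswith (cs.drop i) ['\\', '['] = true ∧
      ¬ cs[i] = '$' := by
  have hdrop : cs.drop i = cs[i] :: cs.drop (i + 1) := List.drop_eq_getElem_cons hn
  refine ⟨?_, ?_, ?_⟩
  · intro h
    have hp := (PySem.Chars.startswith_iff _ _).mp h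
    exact hd (Or.inl ((List.prefix_iff_eq_take.mpr rfl :
      (['$'] : List Char) <+: ['$', '$']).trans hp))
  · intro h
    exact hd (Or.inr ((PySem.Chars.startswith_iff _ _).mp h))
  · intro h
    exact hd (Or.inl (by rw [hdrop, h]; exact ⟨cs.drop (i + 1), rfl⟩))

-- text-run lemma: while no delimiter occurs, A just moves the characters into buf
theorem pvRunA (cs : List Char) (m : Nat) : ∀ (i : Nat) (buf : List Char) segs,
    i + m ≤ cs.length → (∀ j, i ≤ j → j < i + m → ¬ pvDelimAt cs j) →
    pvLoopA cs i buf segs = pvLoopA cs (i + m) (buf ++ (cs.drop i).take m) segs := by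
  induction m with
  | zero => intro i buf segs _ _; simp
  | succ m ih =>
    intro i buf segs hlen hnd
    have hn : i < cs.length := by omega
    obtain ⟨h1, h2, h3⟩ := pvNotDelim_branches hn (hnd i (le_refl _) (by omega))
    have hdrop : cs.drop i = cs[i] :: cs.drop (i + 1) := List.drop_eq_getElem_cons hn
    rw [pvLoopA]
    simp only [dif_pos hn, if_neg h1, if_neg h2, if_neg h3]
    rw [ih (i + 1) (buf ++ [cs[i]]) segs (by omega)
      (fun j hj hj' => hnd j (by omega) (by omega))]
    have hidx : i + (m + 1) = i + 1 + m := by omega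
    rw [hidx, hdrop, List.take_succ_cons]
    simp
    rw [if_neg h1, if_neg h2]

-- min(candidates) is ≤ each candidate that is not -1
theorem pvMin_le {p2 pb p1 q pos : Int}
    (hm : PySem.List.min? ([p2, pb, p1].filter (fun p => p ≠ -1)) id = some pos)
    (hqm : q = p2 ∨ q = pb ∨ q = p1) (hq : q ≠ -1) : pos ≤ q := by
  have hmem : q ∈ [p2, pb, p1].filter (fun p => p ≠ -1) := by
    rw [List.mem_filter]
    exact ⟨by rcases hqm with h | h | h <;> simp [h], by simp [hq]⟩
  exact PySem.List.min?_isMin hm q hmem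

-- A's pending text run flushed at P is exactly B's "text[i:pos] if pos > i" segment
theorem pvFlushRun (cs : List Char) (i P : Nat) (segs : List (String × String))
    (hn : i < cs.length) (hPlen : P ≤ cs.length) :
    pvFlush ((cs.drop i).take (P - i)) segs
      = segs ++ (if (i : Int) < (P : Int) then
          [("text", String.ofList (PySem.List.slice cs (some (i : Int)) (some (P : Int))))]
        else []) := by
  rw [PySem.List.slice_natCast]
  by_cases h : i < P
  · rw [if_pos (by exact_mod_cast h)]
    unfold pvFlush
    rw [if_neg (by
      intro hnil
      have := congrArg List.length hnil
      simp only [List.length_take, List.length_drop, List.length_nil] at this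
      omega)]
  · have h0 : P - i = 0 := by omega
    have hlt : ¬ ((i : Int) < (P : Int)) := by exact_mod_cast h
    simp [h0, pvFlush, hlt]

-- main correspondence, by strong induction on cs.length - i
theorem pvMain (cs : List Char) : ∀ (k i : Nat) segs, cs.length - i ≤ k →
    pvLoopA cs i [] segs = pvLoopB cs i segs := by
  intro k
  induction k with
  | zero =>
    intro i segs hk
    have hn : ¬ i < cs.length := by omega
    rw [pvLoopA, pvLoopB]
    simp [dif_neg hn, pvFlush]
  | succ k ih =>
    intro i segs hk
    by_cases hn : i < cs.length
    case neg => rw [pvLoopA, pvLoopB]; simp [dif_neg hn, pvFlush]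
    rw [pvLoopB]
    simp only [dif_pos hn]
    have hilen : i ≤ cs.length := by omega
    split
    case _ heq =>
      -- no candidate: no delimiter anywhere at or after i
      have hall := List.filter_eq_nil_iff.mp ((PySem.List.min?_eq_none_iff _ _).mp heq)
      have hp1 : PySem.Chars.findFrom cs ['$'] (i : Int) = -1 := by
        simpa using hall (PySem.Chars.findFrom cs ['$'] (i : Int)) (by simp)
      have hpb : PySem.Chars.findFrom cs ['\\', '['] (i : Int) = -1 := by
        simpa using hall (PySem.Chars.findFrom cs ['\\', '['] (i : Int)) (by simp)
      have hnd : ∀ j, i ≤ j → j < i + (cs.length - i) → ¬ pvDelimAt cs j := by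
        intro j hj _ hd
        rcases hd with hp | hp
        · exact pvNoOcc hilen hp1 j hj hp
        · exact pvNoOcc hilen hpb j hj hp
      rw [pvRunA cs (cs.length - i) i [] segs (by omega) hnd]
      have hidx : i + (cs.length - i) = cs.length := by omega
      rw [hidx, pvLoopA]
      have hrun : (cs.drop i).take (cs.length - i) = cs.drop i := by
        apply List.take_of_length_le; simp
      rw [dif_neg (by omega : ¬ cs.length < cs.length), hrun]
      unfold pvFlush
      rw [if_neg (by simp [List.drop_eq_nil_iff]; omega)]
      rw [PySem.List.slice_from_natCast]
      simp
    case _ pos heq =>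
      obtain ⟨hne, hcase⟩ := pvMin_cases heq
      have hposge : (i : Int) ≤ pos := by
        rcases hcase with h | h | h
        · rw [h]; exact (pvFF_bounds cs ['$', '$'] i hilen (by simp) (by rw [← h]; exact hne)).1
        · rw [h]; exact (pvFF_bounds cs ['\\', '['] i hilen (by simp) (by rw [← h]; exact hne)).1
        · rw [h]; exact (pvFF_bounds cs ['$'] i hilen (by simp) (by rw [← h]; exact hne)).1
      have hposnn : (0 : Int) ≤ pos := le_trans (Int.natCast_nonneg i) hposge
      set P := pos.toNat with hPdef
      have hposcast : pos = (P : Int) := (Int.toNat_of_nonneg hposnn).symm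
      have hiP : i ≤ P := by omega
      have hPlt : P < cs.length := by
        rcases hcase with h | h | h
        · have hb := pvFF_bounds cs ['$', '$'] i hilen (by simp) (by rw [← h]; exact hne)
          rw [← h] at hb; simp at hb; omega
        · have hb := pvFF_bounds cs ['\\', '['] i hilen (by simp) (by rw [← h]; exact hne)
          rw [← h] at hb; simp at hb; omega
        · have hb := pvFF_bounds cs ['$'] i hilen (by simp) (by rw [← h]; exact hne)
          rw [← h] at hb; simp at hb; omega
      have hnd : ∀ j, i ≤ j → j < i + (P - i) → ¬ pvDelimAt cs j := by
        intro j hj hjP hd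
        rcases hd with hp | hp
        · obtain ⟨hne1, hle1⟩ := pvOcc_le hilen hj hp
          have hmle := pvMin_le heq (Or.inr (Or.inr rfl)) hne1
          omega
        · obtain ⟨hneb, hleb⟩ := pvOcc_le hilen hj hp
          have hmle := pvMin_le heq (Or.inr (Or.inl rfl)) hneb
          omega
      rw [pvRunA cs (P - i) i [] segs (by omega) hnd]
      have hidx : i + (P - i) = P := by omega
      rw [hidx, pvLoopA]
      simp only [dif_pos hPlt, List.nil_append]
      rw [hposcast]
      have hneP : ((P : Nat) : Int) ≠ -1 := by omega
      by_cases hc2 : PySem.Chars.findFrom cs ['$', '$'] (i : Int) = (P : Int)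
      · have hsel := hc2
        have hbp := pvFF_bounds cs ['$', '$'] i hilen (by simp) (by rw [hsel]; exact hneP)
        rw [hsel] at hbp
        have hpre : ['$', '$'] <+: cs.drop P := by
          obtain ⟨-, hpre, -⟩ :=
            PySem.Chars.findFrom_natCast_spec cs ['$', '$'] i hilen (by rw [hsel]; exact hneP)
          rw [hsel] at hpre; simpa using hpre
        have hkP : P + 2 ≤ cs.length := by
          have := hpre.length_le; simp at this; omega
        rw [dif_pos (show PySem.Chars.startswith (cs.drop P) ['$', '$'] = true from
          (PySem.Chars.startswith_iff _ _).mpr hpre)]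
        rw [dif_pos hsel]
        rw [pvFlushRun cs i P segs hn (by omega)]
        push_cast
        by_cases he : PySem.Chars.findFrom cs ['$', '$'] ((P : Int) + 2) = -1
        · simp only [dif_pos he]
          unfold pvFlush
          rw [PySem.List.slice_from_natCast]
          rw [if_neg (by simp [List.drop_eq_nil_iff]; omega)]
        · simp only [dif_neg he]
          have hbe := pvFF_bounds cs ['$', '$'] (P + 2) hkP (by simp)
            (by push_cast; exact he)
          have hcc : ((P + 2 : Nat) : Int) = (P : Int) + 2 := by push_cast; ring
          rw [hcc] at hbe
          exact ih _ _ (by omega)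
      · by_cases hcb : PySem.Chars.findFrom cs ['\\', '['] (i : Int) = (P : Int)
        · have hsel := hcb
          have hbp := pvFF_bounds cs ['\\', '['] i hilen (by simp) (by rw [hsel]; exact hneP)
          rw [hsel] at hbp
          have hpre : ['\\', '['] <+: cs.drop P := by
            obtain ⟨-, hpre, -⟩ :=
              PySem.Chars.findFrom_natCast_spec cs ['\\', '['] i hilen (by rw [hsel]; exact hneP)
            rw [hsel] at hpre; simpa using hpre
          have hkP : P + 2 ≤ cs.length := by
            have := hpre.length_le; simp at this; omega
          have hns2 : ¬ PySem.Chars.startswith (cs.drop P) ['$', '$'] = true := by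
            intro h
            obtain ⟨hne2, hle2⟩ := pvOcc_le hilen hiP ((PySem.Chars.startswith_iff _ _).mp h)
            have hmle := pvMin_le heq (Or.inl rfl) hne2
            have hge2 := (pvFF_bounds cs ['$', '$'] i hilen (by simp) hne2).1
            rw [hposcast] at hmle
            exact hc2 (by omega)
          rw [dif_neg hns2]
          rw [dif_pos (show PySem.Chars.startswith (cs.drop P) ['\\', '['] = true from
            (PySem.Chars.startswith_iff _ _).mpr hpre)]
          rw [dif_neg hc2, dif_pos hsel]
          rw [pvFlushRun cs i P segs hn (by omega)]
          push_cast
          by_cases he : PySem.Chars.findFrom cs ['\\', ']'] ((P : Int) + 2) = -1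
          · simp only [dif_pos he]
            unfold pvFlush
            rw [PySem.List.slice_from_natCast]
            rw [if_neg (by simp [List.drop_eq_nil_iff]; omega)]
          · simp only [dif_neg he]
            have hbe := pvFF_bounds cs ['\\', ']'] (P + 2) hkP (by simp)
              (by push_cast; exact he)
            have hcc : ((P + 2 : Nat) : Int) = (P : Int) + 2 := by push_cast; ring
            rw [hcc] at hbe
            exact ih _ _ (by omega)
        · have hsel : PySem.Chars.findFrom cs ['$'] (i : Int) = (P : Int) := by
            rcases hcase with h | h | h
            · exact absurd (by rw [← h, hposcast]) hc2
            · exact absurd (by rw [← h, hposcast]) hcb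
            · rw [← h, hposcast]
          have hbp := pvFF_bounds cs ['$'] i hilen (by simp) (by rw [hsel]; exact hneP)
          rw [hsel] at hbp
          have hpre : ['$'] <+: cs.drop P := by
            obtain ⟨-, hpre, -⟩ :=
              PySem.Chars.findFrom_natCast_spec cs ['$'] i hilen (by rw [hsel]; exact hneP)
            rw [hsel] at hpre; simpa using hpre
          have hkP : P + 1 ≤ cs.length := by
            have := hpre.length_le; simp at this; omega
          have hns2 : ¬ PySem.Chars.startswith (cs.drop P) ['$', '$'] = true := by
            intro h
            obtain ⟨hne2, hle2⟩ := pvOcc_le hilen hiP ((PySem.Chars.startswith_iff _ _).mp h)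
            have hmle := pvMin_le heq (Or.inl rfl) hne2
            have hge2 := (pvFF_bounds cs ['$', '$'] i hilen (by simp) hne2).1
            rw [hposcast] at hmle
            exact hc2 (by omega)
          have hnsb : ¬ PySem.Chars.startswith (cs.drop P) ['\\', '['] = true := by
            intro h
            obtain ⟨hneb, hleb⟩ := pvOcc_le hilen hiP ((PySem.Chars.startswith_iff _ _).mp h)
            have hmle := pvMin_le heq (Or.inr (Or.inl rfl)) hneb
            have hgeb := (pvFF_bounds cs ['\\', '['] i hilen (by simp) hneb).1
            rw [hposcast] at hmle
            exact hcb (by omega)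
          have hchar : cs[P]'hPlt = '$' := by
            have hdropP := List.drop_eq_getElem_cons hPlt
            rw [hdropP, List.cons_prefix_cons] at hpre
            exact hpre.1.symm
          rw [dif_neg hns2, dif_neg hnsb, if_pos hchar]
          rw [dif_neg hc2, dif_neg hcb]
          rw [pvFlushRun cs i P segs hn (by omega)]
          push_cast
          by_cases he : PySem.Chars.findFrom cs ['$'] ((P : Int) + 1) = -1
          · simp only [dif_pos he]
            unfold pvFlush
            rw [PySem.List.slice_from_natCast]
            rw [if_neg (by simp [List.drop_eq_nil_iff]; omega)]
          · simp only [dif_neg he]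
            have hbe := pvFF_bounds cs ['$'] (P + 1) hkP (by simp)
              (by push_cast; exact he)
            have hcc : ((P + 1 : Nat) : Int) = (P : Int) + 1 := by push_cast; ring
            rw [hcc] at hbe
            exact ih _ _ (by omega)
-- ===== VERDICT (by name: the statement is the Claim_ definition above) =====
theorem parse_math_segments_spec : Claim_equal_parse_math_segments := by
  intro text _
  unfold Spec_parse_math_segments parse_math_segments parse_math_segments_alt
  exact pvMain text.toList text.toList.length 0 [] (by omega)
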